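-- pv_equiv track=rewrite | github.com/sampsyo/rematch | server/views.py | semester_options
-- ===== SOURCE A (Python) =====
-- def semester_options(lookahead, curr_sem, year, options):
--     if lookahead == 0:
--         return options
--     else:
--         lookahead -= 1
--         semesters = ["Spring", "Summer", "Fall", "Winter"]
--         next_sem = semesters[(semesters.index(curr_sem) + 1) % 4]
--         year = year + 1 if next_sem == "Spring" else year
--         options.append(next_sem + " " + str(year))
--         return semester_options(lookahead, next_sem, year, options)
-- ===== SOURCE B (Python) =====
-- def semester_options(lookahead, curr_sem, year, options):
--     if lookahead <= 0:
--         return options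
--     semesters = ["Spring", "Summer", "Fall", "Winter"]
--     idx = semesters.index(curr_sem)
--     for _ in range(lookahead):
--         idx = (idx + 1) % 4
--         if idx == 0:
--             year += 1
--         options.append(semesters[idx] + " " + str(year))
--     return options
-- ===== Notes on version B (the rewrite author's own statement) =====
-- stated objective: idiomatic
-- what changed: Replaces A's tail recursion (which re-resolves the semester name with list.index on every step) with a single iterative for-loop over range(lookahead) that resolves the index once and then advances it arithmetically.
import Mathlib
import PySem

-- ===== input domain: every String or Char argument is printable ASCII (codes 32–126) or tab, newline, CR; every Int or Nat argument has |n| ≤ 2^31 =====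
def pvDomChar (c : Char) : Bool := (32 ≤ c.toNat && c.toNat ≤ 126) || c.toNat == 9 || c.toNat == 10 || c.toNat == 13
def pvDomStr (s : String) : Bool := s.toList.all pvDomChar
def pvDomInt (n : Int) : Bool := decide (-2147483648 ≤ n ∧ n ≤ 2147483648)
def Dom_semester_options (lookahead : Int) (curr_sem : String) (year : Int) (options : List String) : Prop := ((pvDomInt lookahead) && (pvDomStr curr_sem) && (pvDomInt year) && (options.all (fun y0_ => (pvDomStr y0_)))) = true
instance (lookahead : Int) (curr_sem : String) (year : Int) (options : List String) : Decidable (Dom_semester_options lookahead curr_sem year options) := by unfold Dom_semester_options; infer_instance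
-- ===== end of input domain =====

-- B replaces A's tail recursion by one iterative loop that resolves the semester index once
-- and advances it arithmetically (idiomatic rewrite; equivalence is about the RETURN value —
-- Python A and B both mutate `options` in place identically).

-- ===== PORT A =====
-- fuel recursion on lookahead.toNat: exact for lookahead ≥ 0 (Python diverges on negative
-- lookahead, excluded by Pre_); `.getD 0` stands for list.index, whose ValueError case is
-- excluded by Pre_ as well.
def semAuxA : Nat → String → Int → List String → List String
  | 0, _, _, options => options
  | n + 1, curr_sem, year, options =>
    let semesters := ["Spring", "Summer", "Fall", "Winter"]
    let next_sem := semesters.getD (((PySem.List.index? semesters curr_sem).getD 0 + 1) % 4) ""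
    let year' := if next_sem == "Spring" then year + 1 else year
    semAuxA n next_sem year' (options ++ [next_sem ++ " " ++ PySem.Int.toStr year'])

def semester_options (lookahead : Int) (curr_sem : String) (year : Int) (options : List String) : List String :=
  semAuxA lookahead.toNat curr_sem year options

-- ===== PORT B =====
def semBStep (semesters : List String) (s : Nat × Int × List String) : Nat × Int × List String :=
  let i := (s.1 + 1) % 4
  let y := if i == 0 then s.2.1 + 1 else s.2.1
  (i, y, s.2.2 ++ [semesters.getD i "" ++ " " ++ PySem.Int.toStr y])

def semester_options_alt (lookahead : Int) (curr_sem : String) (year : Int) (options : List String) : List String :=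
  if lookahead ≤ 0 then options
  else
    let semesters := ["Spring", "Summer", "Fall", "Winter"]
    let idx := (PySem.List.index? semesters curr_sem).getD 0
    ((List.range lookahead.toNat).foldl (fun s _ => semBStep semesters s) (idx, year, options)).2.2

-- ===== PRECONDITION & SPEC =====
-- Pre_ excludes exactly the inputs where Python A raises: negative lookahead (unbounded
-- recursion, RecursionError) and, when at least one step runs, a curr_sem that is not one of
-- the four semester names (list.index ValueError).
def Pre_semester_options (lookahead : Int) (curr_sem : String) (year : Int) (options : List String) : Prop :=
  0 ≤ lookahead ∧ (lookahead = 0 ∨ curr_sem ∈ ["Spring", "Summer", "Fall", "Winter"])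
instance (lookahead : Int) (curr_sem : String) (year : Int) (options : List String) : Decidable (Pre_semester_options lookahead curr_sem year options) := by unfold Pre_semester_options; infer_instance

def pvWitness_semester_options : Int × String × Int × List String := (3, "Fall", 2023, ["Spring 2023"])

def Spec_semester_options (lookahead : Int) (curr_sem : String) (year : Int) (options : List String) (out : List String) : Prop := out = semester_options_alt lookahead curr_sem year options
instance (lookahead : Int) (curr_sem : String) (year : Int) (options : List String) (out : List String) : Decidable (Spec_semester_options lookahead curr_sem year options out) := by unfold Spec_semester_options; infer_instance

-- ===== CLAIM (what is proved, stated in full; the proofs are below) =====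
def Claim_equal_semester_options : Prop := ∀ (lookahead : Int) (curr_sem : String) (year : Int) (options : List String), Dom_semester_options lookahead curr_sem year options → Pre_semester_options lookahead curr_sem year options → Spec_semester_options lookahead curr_sem year options (semester_options lookahead curr_sem year options)


-- ===== LEMMAS AND PROOFS =====

-- a count-only foldl over range is function iteration
theorem foldl_range_iterate {α : Type} (g : α → α) (n : Nat) (init : α) :
    (List.range n).foldl (fun s _ => g s) init = g^[n] init := by
  induction n generalizing init with
  | zero => rfl
  | succ n ih =>
    rw [List.range_succ, List.foldl_append, ih, Function.iterate_succ_apply']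
    rfl

-- A's recursion, started on the idx-th semester name, computes B's iterated step
theorem semAuxA_eq_iterate (n : Nat) :
    ∀ (idx : Nat) (year : Int) (options : List String), idx < 4 →
    semAuxA n (["Spring", "Summer", "Fall", "Winter"].getD idx "") year options
      = ((semBStep ["Spring", "Summer", "Fall", "Winter"])^[n] (idx, year, options)).2.2 := by
  induction n with
  | zero => intro idx year options _; rfl
  | succ n ih =>
    intro idx year options hidx
    rw [Function.iterate_succ_apply]
    interval_cases idx
    · exact (by simpa [semAuxA, semBStep] using ih 1 year (options ++ ["Summer" ++ " " ++ PySem.Int.toStr year]) (by omega))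
    · exact (by simpa [semAuxA, semBStep] using ih 2 year (options ++ ["Fall" ++ " " ++ PySem.Int.toStr year]) (by omega))
    · exact (by simpa [semAuxA, semBStep] using ih 3 year (options ++ ["Winter" ++ " " ++ PySem.Int.toStr year]) (by omega))
    · exact (by simpa [semAuxA, semBStep] using ih 0 (year + 1) (options ++ ["Spring" ++ " " ++ PySem.Int.toStr (year + 1)]) (by omega))

-- ===== VERDICT (by name: the statement is the Claim_ definition above) =====
theorem semester_options_spec : Claim_equal_semester_options := by
  intro lookahead curr_sem year options _ hpre
  obtain ⟨hle, hsem⟩ := hpre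
  unfold Spec_semester_options semester_options semester_options_alt
  by_cases h0 : lookahead ≤ 0
  · have : lookahead = 0 := le_antisymm h0 hle
    subst this
    simp [semAuxA]
  · rcases hsem with h | hmem
    · omega
    simp only [if_neg h0]
    rw [foldl_range_iterate]
    fin_cases hmem
    · exact semAuxA_eq_iterate lookahead.toNat 0 year options (by omega)
    · exact semAuxA_eq_iterate lookahead.toNat 1 year options (by omega)
    · exact semAuxA_eq_iterate lookahead.toNat 2 year options (by omega)
    · exact semAuxA_eq_iterate lookahead.toNat 3 year options (by omega)
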